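-- pv_equiv track=rewrite | github.com/pushpa-info-14/python-programming | LeetCode/3750-4000/Q3876 Construct Uniform Parity Array II.py | uniformArray
-- ===== SOURCE A (Python) =====
-- def uniformArray(nums1: list[int]) -> bool:
--     n = len(nums1)
--     odd_nums = []
--     even_nums = []
--     for num in nums1:
--         if num & 1:
--             odd_nums.append(num)
--         else:
--             even_nums.append(num)
--     if len(odd_nums) == n or len(even_nums) == n:
--         return True
--
--     # odd - odd = even
--     try_even = True
--     if len(odd_nums) > 0:
--         try_even = False
--
--     # even - odd = odd
--     try_odd = True
--     odd_nums.sort()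
--     if odd_nums[0] >= sorted(even_nums)[0]:
--         try_odd = False
--     return try_even or try_odd
-- ===== SOURCE B (Python) =====
-- def uniformArray(nums1: list[int]) -> bool:
--     if not nums1:
--         return True
--     if not any(x & 1 for x in nums1):
--         return True
--     return min(nums1) & 1 == 1
-- ===== Notes on version B (the rewrite author's own statement) =====
-- stated objective: faster
-- what changed: Replaces A's partition into odd/even lists plus two sorts and a head comparison by one pass: answer is True iff the list is empty, has no odd element, or its overall minimum is odd (min_odd < min_even iff the global minimum is odd).
import Mathlib
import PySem

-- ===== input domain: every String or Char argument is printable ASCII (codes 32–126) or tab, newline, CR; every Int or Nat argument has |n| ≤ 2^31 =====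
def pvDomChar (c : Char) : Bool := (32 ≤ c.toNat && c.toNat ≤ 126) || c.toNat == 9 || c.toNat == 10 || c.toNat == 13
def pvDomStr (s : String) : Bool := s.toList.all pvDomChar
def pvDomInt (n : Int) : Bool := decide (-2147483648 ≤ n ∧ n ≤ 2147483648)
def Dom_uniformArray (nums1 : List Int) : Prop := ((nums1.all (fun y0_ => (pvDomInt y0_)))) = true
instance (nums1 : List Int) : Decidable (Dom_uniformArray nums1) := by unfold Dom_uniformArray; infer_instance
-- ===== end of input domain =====

-- B replaces A's odd/even partition, two sorts and head comparison by one pass: empty or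
-- all-even lists give True, otherwise the answer is whether the global minimum is odd.

-- ===== PORT A =====
def uniformArray (nums1 : List Int) : Bool :=
  let n := nums1.length
  let p := nums1.foldl
    (fun (st : List Int × List Int) num =>
      if PySem.Int.band num 1 ≠ 0 then (st.1 ++ [num], st.2) else (st.1, st.2 ++ [num]))
    (([] : List Int), ([] : List Int))
  let odd_nums := p.1
  let even_nums := p.2
  if odd_nums.length = n ∨ even_nums.length = n then true
  else
    let try_even := if odd_nums.length > 0 then false else true
    let try_odd :=
      if (PySem.List.pyGet? (PySem.List.sorted odd_nums (fun y => y) false) 0).getD 0 ≥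
         (PySem.List.pyGet? (PySem.List.sorted even_nums (fun y => y) false) 0).getD 0
      then false else true
    try_even || try_odd

-- ===== PORT B =====
def uniformArray_alt (nums1 : List Int) : Bool :=
  match nums1 with
  | [] => true
  | x :: t =>
    if ¬ (x :: t).any (fun y => decide (PySem.Int.band y 1 ≠ 0)) then true
    else PySem.Int.band (t.foldl min x) 1 == 1   -- min(nums1) is the running-min loop (min?_id_cons)

-- ===== PRECONDITION & SPEC =====
def Spec_uniformArray (nums1 : List Int) (out : Bool) : Prop := out = uniformArray_alt nums1
instance (nums1 : List Int) (out : Bool) : Decidable (Spec_uniformArray nums1 out) := by unfold Spec_uniformArray; infer_instance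

-- ===== CLAIM (what is proved, stated in full; the proofs are below) =====
def Claim_equal_uniformArray : Prop := ∀ (nums1 : List Int), Dom_uniformArray nums1 → Spec_uniformArray nums1 (uniformArray nums1)

-- ===== LEMMAS AND PROOFS =====

-- x & 1 is 0 or 1
theorem pv_band_one_cases (x : Int) : PySem.Int.band x 1 = 0 ∨ PySem.Int.band x 1 = 1 := by
  rw [PySem.Int.band_one]
  unfold PySem.Int.mod
  rw [Int.fmod_eq_emod]
  simp
  omega

-- A's loop is the pair of filters
theorem pv_partition (nums1 acc1 acc2 : List Int) :
    nums1.foldl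
      (fun (st : List Int × List Int) num =>
        if PySem.Int.band num 1 ≠ 0 then (st.1 ++ [num], st.2) else (st.1, st.2 ++ [num]))
      (acc1, acc2)
    = (acc1 ++ nums1.filter (fun y => decide (PySem.Int.band y 1 ≠ 0)),
       acc2 ++ nums1.filter (fun y => !decide (PySem.Int.band y 1 ≠ 0))) := by
  induction nums1 generalizing acc1 acc2 with
  | nil => simp
  | cons y t ih =>
    simp only [List.foldl_cons, List.filter_cons]
    by_cases h : PySem.Int.band y 1 ≠ 0
    · rw [if_pos h, ih]; simp [h]
    · rw [if_neg h, ih]; simp [h]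

-- head of sorted is a minimum
theorem pv_sorted_head {l : List Int} {m : Int} {t : List Int}
    (h : PySem.List.sorted l (fun y => y) false = m :: t) :
    m ∈ l ∧ ∀ y ∈ l, m ≤ y := by
  constructor
  · have hp := PySem.List.sorted_perm l (fun y => y) false
    rw [h] at hp
    exact hp.mem_iff.mp (by simp)
  · exact PySem.List.key_head_sorted_le l (fun y => y) h

-- running min is a minimum
theorem pv_foldl_min (x : Int) (t : List Int) :
    t.foldl min x ∈ x :: t ∧ ∀ y ∈ x :: t, t.foldl min x ≤ y := by
  have h : PySem.List.min? (x :: t) (fun y => y) = some (t.foldl min x) :=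
    PySem.List.min?_id_cons x t
  exact ⟨PySem.List.min?_mem h, fun y hy => PySem.List.min?_isMin h y hy⟩

-- ===== VERDICT (by name: the statement is the Claim_ definition above) =====
theorem uniformArray_spec : Claim_equal_uniformArray := by
  intro nums1 _
  unfold Spec_uniformArray uniformArray uniformArray_alt
  match nums1 with
  | [] => simp
  | x :: t =>
    simp only
    rw [pv_partition]
    simp only [List.nil_append]
    set odds := (x :: t).filter (fun y => decide (PySem.Int.band y 1 ≠ 0)) with hodds
    set evens := (x :: t).filter (fun y => !decide (PySem.Int.band y 1 ≠ 0)) with hevens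
    have hlen : odds.length + evens.length = (x :: t).length := by
      rw [hodds, hevens]
      simpa using (List.filter_append_perm (fun y => decide (PySem.Int.band y 1 ≠ 0)) (x :: t)).length_eq
    have hmemo : ∀ y, y ∈ odds ↔ y ∈ x :: t ∧ PySem.Int.band y 1 ≠ 0 := by
      intro y; rw [hodds]; simp
    have hmeme : ∀ y, y ∈ evens ↔ y ∈ x :: t ∧ PySem.Int.band y 1 = 0 := by
      intro y; rw [hevens]; simp
    obtain ⟨hMmem, hMmin⟩ := pv_foldl_min x t
    set M := t.foldl min x with hM
    by_cases ho : odds = []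
    · -- all even: both sides true
      have hany : (x :: t).any (fun y => decide (PySem.Int.band y 1 ≠ 0)) = false := by
        simp only [List.any_eq_false]
        intro y hy
        by_contra hc
        have : y ∈ odds := (hmemo y).mpr ⟨hy, by simpa using hc⟩
        simp [ho] at this
      have heven : ∀ y ∈ x :: t, PySem.Int.band y 1 = 0 := by
        intro y hy
        by_contra hc
        have : y ∈ odds := (hmemo y).mpr ⟨hy, hc⟩
        simp [ho] at this
      have : evens.length = (x :: t).length := by rw [ho] at hlen; simpa using hlen
      simp only [this, or_true, if_pos]
      simp
      exact Or.inl ⟨heven x (by simp), fun y hy => heven y (by simp [hy])⟩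
    · by_cases he : evens = []
      · -- all odd: both sides true
        have hox : odds.length = (x :: t).length := by rw [he] at hlen; simpa using hlen
        obtain ⟨a, ha, hodd⟩ : ∃ a, a ∈ x :: t ∧ PySem.Int.band a 1 ≠ 0 := by
          rcases List.exists_mem_of_ne_nil odds ho with ⟨a, ha⟩
          exact ⟨a, (hmemo a).mp ha⟩
        have hanyt : (x :: t).any (fun y => decide (PySem.Int.band y 1 ≠ 0)) = true := by
          rw [List.any_eq_true]; exact ⟨a, ha, by simpa using hodd⟩
        have hModd : PySem.Int.band M 1 = 1 := by
          rcases pv_band_one_cases M with h0 | h1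
          · have : M ∈ evens := (hmeme M).mpr ⟨hMmem, h0⟩
            simp [he] at this
          · exact h1
        simp [hox, hModd]
      · -- both parities present
        obtain ⟨a, ta, hsa⟩ : ∃ a ta, PySem.List.sorted odds (fun y => y) false = a :: ta := by
          cases hs : PySem.List.sorted odds (fun y => y) false with
          | nil => exact absurd ((PySem.List.sorted_eq_nil_iff odds (fun y => y) false).mp hs) ho
          | cons a ta => exact ⟨a, ta, rfl⟩
        obtain ⟨b, tb, hsb⟩ : ∃ b tb, PySem.List.sorted evens (fun y => y) false = b :: tb := by
          cases hs : PySem.List.sorted evens (fun y => y) false with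
          | nil => exact absurd ((PySem.List.sorted_eq_nil_iff evens (fun y => y) false).mp hs) he
          | cons b tb => exact ⟨b, tb, rfl⟩
        obtain ⟨hamem, hamin⟩ := pv_sorted_head hsa
        obtain ⟨hbmem, hbmin⟩ := pv_sorted_head hsb
        have hlo : odds.length ≠ (x :: t).length := by
          intro hc; rw [hc] at hlen
          have : evens.length = 0 := by omega
          exact he (List.eq_nil_of_length_eq_zero this)
        have hle : evens.length ≠ (x :: t).length := by
          intro hc; rw [hc] at hlen
          have : odds.length = 0 := by omega
          exact ho (List.eq_nil_of_length_eq_zero this)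
        have hlpos : 0 < odds.length := List.length_pos_iff.mpr ho
        have haodd : PySem.Int.band a 1 ≠ 0 := ((hmemo a).mp hamem).2
        have hbeven : PySem.Int.band b 1 = 0 := ((hmeme b).mp hbmem).2
        have hanyt : (x :: t).any (fun y => decide (PySem.Int.band y 1 ≠ 0)) = true := by
          rw [List.any_eq_true]
          exact ⟨a, ((hmemo a).mp hamem).1, by simpa using haodd⟩
        have hMa : M ≤ a := hMmin a ((hmemo a).mp hamem).1
        have hMb : M ≤ b := hMmin b ((hmeme b).mp hbmem).1
        rcases pv_band_one_cases M with h0 | h1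
        · -- M even ⇒ M = b ⇒ a ≥ b; both branches give false
          have hMe : M ∈ evens := (hmeme M).mpr ⟨hMmem, h0⟩
          have hbM : b = M := le_antisymm (hbmin M hMe) hMb
          have hge : (PySem.List.pyGet? (PySem.List.sorted odds (fun y => y) false) 0).getD 0 ≥
              (PySem.List.pyGet? (PySem.List.sorted evens (fun y => y) false) 0).getD 0 := by
            rw [hsa, hsb]
            simp only [PySem.List.pyGet?, PySem.List.pyIdx?]
            norm_num
            omega
          have hP : ¬(odds.length = (x :: t).length ∨ evens.length = (x :: t).length) :=
            fun hc => hc.elim hlo hle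
          have hQ : ¬(¬ ((x :: t).any fun y => decide (PySem.Int.band y 1 ≠ 0)) = true) := by
            rw [hanyt]; decide
          rw [if_neg hP, if_pos hlpos, if_pos hge, if_neg hQ]
          simp [h0]
        · -- M odd ⇒ M = a < b; both branches give true
          have hMo : M ∈ odds := (hmemo M).mpr ⟨hMmem, by rw [h1]; decide⟩
          have haM : a = M := le_antisymm (hamin M hMo) hMa
          have hMltb : M < b := lt_of_le_of_ne hMb (by
            intro hc; rw [hc, hbeven] at h1; exact absurd h1 (by decide))
          have hlt : ¬ ((PySem.List.pyGet? (PySem.List.sorted odds (fun y => y) false) 0).getD 0 ≥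
              (PySem.List.pyGet? (PySem.List.sorted evens (fun y => y) false) 0).getD 0) := by
            rw [hsa, hsb]
            simp only [PySem.List.pyGet?, PySem.List.pyIdx?]
            norm_num
            omega
          have hP : ¬(odds.length = (x :: t).length ∨ evens.length = (x :: t).length) :=
            fun hc => hc.elim hlo hle
          have hQ : ¬(¬ ((x :: t).any fun y => decide (PySem.Int.band y 1 ≠ 0)) = true) := by
            rw [hanyt]; decide
          rw [if_neg hP, if_pos hlpos, if_neg hlt, if_neg hQ]
          simp [h1]
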